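-- pv_equiv track=rewrite | github.com/rsazidur/BracU | CSE111/Assignment1/10Task.py | combine_dictionaries
-- ===== SOURCE A (Python) =====
-- def combine_dictionaries(dict_1, dict_2):
--
--     combined_dict = {}
--
--     for key in dict_1:
--         if key in dict_2:
--             new_value = dict_1[key] + dict_2[key]
--         else:
--             new_value = dict_1[key]
--
--         combined_dict[key] = new_value
--
--     for key in dict_2:
--         if key not in combined_dict:
--             combined_dict[key] = dict_2[key]
--
--     return combined_dict
-- ===== SOURCE B (Python) =====
-- def combine_dictionaries(dict_1, dict_2):
--     # Group-by over the concatenation: pool all items of both dicts, take the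
--     # keys in first-occurrence order, and give each key the sum of all its
--     # pooled values (a key shared by both dicts contributes two values).
--     items = list(dict_1.items()) + list(dict_2.items())
--     order = []
--     for key, _ in items:
--         if key not in order:
--             order.append(key)
--     return {key: sum(value for k, value in items if k == key) for key in order}
-- ===== Notes on version B (the rewrite author's own statement) =====
-- stated objective: alternative
-- what changed: Replaces A's two branched dict-building loops by a group-by over the concatenated item pool: collect first-occurrence key order, then a per-key sum over all pooled values via a dict comprehension.
import Mathlib
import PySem

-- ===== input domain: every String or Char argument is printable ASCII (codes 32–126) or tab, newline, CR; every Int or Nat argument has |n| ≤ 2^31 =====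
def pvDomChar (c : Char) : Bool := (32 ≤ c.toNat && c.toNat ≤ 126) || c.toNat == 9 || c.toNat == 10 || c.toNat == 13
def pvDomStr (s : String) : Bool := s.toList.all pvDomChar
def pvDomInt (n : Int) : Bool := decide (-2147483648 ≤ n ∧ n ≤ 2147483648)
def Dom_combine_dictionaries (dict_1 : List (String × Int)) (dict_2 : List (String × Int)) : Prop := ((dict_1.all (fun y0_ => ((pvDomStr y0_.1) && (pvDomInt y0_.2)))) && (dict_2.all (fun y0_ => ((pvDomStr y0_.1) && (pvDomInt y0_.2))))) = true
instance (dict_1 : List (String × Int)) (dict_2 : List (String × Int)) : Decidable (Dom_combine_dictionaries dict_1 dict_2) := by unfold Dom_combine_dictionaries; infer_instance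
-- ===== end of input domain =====

-- B replaces A's two branched dict-building loops by a group-by over the pooled items of both
-- dicts (first-occurrence key order, per-key sum over the pool); alternative algorithm, same result.


-- ===== PORT A =====
def combine_dictionaries (dict_1 : List (String × Int)) (dict_2 : List (String × Int)) : List (String × Int) :=
  let D1 : PySem.Dict String Int := PySem.Dict.mk dict_1
  let D2 : PySem.Dict String Int := PySem.Dict.mk dict_2
  -- combined_dict = {}
  -- for key in dict_1: new_value = dict_1[key] + dict_2[key] if key in dict_2 else dict_1[key]; combined_dict[key] = new_value
  let c1 := (PySem.Dict.keys D1).foldl (fun c k =>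
      let new_value := if PySem.Dict.contains D2 k
        then PySem.Dict.getD D1 k 0 + PySem.Dict.getD D2 k 0
        else PySem.Dict.getD D1 k 0
      PySem.Dict.insert c k new_value) PySem.Dict.empty
  -- for key in dict_2: if key not in combined_dict: combined_dict[key] = dict_2[key]
  let c2 := (PySem.Dict.keys D2).foldl (fun c k =>
      if PySem.Dict.contains c k then c else PySem.Dict.insert c k (PySem.Dict.getD D2 k 0)) c1
  c2.items

-- ===== PORT B =====
def combine_dictionaries_alt (dict_1 : List (String × Int)) (dict_2 : List (String × Int)) : List (String × Int) :=
  -- items = list(dict_1.items()) + list(dict_2.items())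
  let items := (PySem.Dict.mk dict_1).items ++ (PySem.Dict.mk dict_2).items
  -- order = []; for key, _ in items: if key not in order: order.append(key)
  let order := items.foldl (fun o kv => if o.contains kv.1 then o else o ++ [kv.1]) []
  -- {key: sum(value for k, value in items if k == key) for key in order}
  (order.foldl (fun d key =>
      d.insert key ((items.filter (fun kv => kv.1 == key)).foldl (fun s kv => s + kv.2) 0))
    PySem.Dict.empty).items

-- ===== PRECONDITION & SPEC =====
-- The association lists encode Python dicts, whose keys are necessarily distinct; Pre_ excludes
-- duplicate-key lists, which correspond to no input the Python programs can receive.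
def Pre_combine_dictionaries (dict_1 : List (String × Int)) (dict_2 : List (String × Int)) : Prop :=
  (dict_1.map Prod.fst).Nodup ∧ (dict_2.map Prod.fst).Nodup
instance (dict_1 : List (String × Int)) (dict_2 : List (String × Int)) : Decidable (Pre_combine_dictionaries dict_1 dict_2) := by unfold Pre_combine_dictionaries; infer_instance

def pvWitness_combine_dictionaries : (List (String × Int)) × (List (String × Int)) :=
  ([("a", 1), ("b", 2)], [("b", 10), ("c", 3)])

def Spec_combine_dictionaries (dict_1 : List (String × Int)) (dict_2 : List (String × Int)) (out : List (String × Int)) : Prop := out = combine_dictionaries_alt dict_1 dict_2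
instance (dict_1 : List (String × Int)) (dict_2 : List (String × Int)) (out : List (String × Int)) : Decidable (Spec_combine_dictionaries dict_1 dict_2 out) := by unfold Spec_combine_dictionaries; infer_instance

-- ===== CLAIM (what is proved, stated in full; the proofs are below) =====
def Claim_equal_combine_dictionaries : Prop := ∀ (dict_1 : List (String × Int)) (dict_2 : List (String × Int)), Dom_combine_dictionaries dict_1 dict_2 → Pre_combine_dictionaries dict_1 dict_2 → Spec_combine_dictionaries dict_1 dict_2 (combine_dictionaries dict_1 dict_2)

-- ===== LEMMAS AND PROOFS =====

/-- A's second loop: inserting only not-yet-present keys appends exactly the fresh ones. -/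
theorem pv_phase2 (ks : List String) (g : String → Int) (c : PySem.Dict String Int)
    (hnd : ks.Nodup) :
    (ks.foldl (fun c k => if PySem.Dict.contains c k then c else PySem.Dict.insert c k (g k)) c).items
    = c.items ++ (ks.filter (fun k => !(PySem.Dict.contains c k))).map (fun k => (k, g k)) := by
  induction ks generalizing c with
  | nil => simp
  | cons k rest ih =>
    have hkrest : k ∉ rest := (List.nodup_cons.mp hnd).1
    have hrest : rest.Nodup := (List.nodup_cons.mp hnd).2
    simp only [List.foldl_cons, List.filter_cons]
    by_cases hc : PySem.Dict.contains c k = true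
    · rw [if_pos hc, ih c hrest, hc]; simp
    · have hc' : PySem.Dict.contains c k = false := by simpa using hc
      rw [if_neg (by simp [hc']), ih _ hrest,
        PySem.Dict.items_insert_of_not_contains c _ hc', hc']
      have : rest.filter (fun j => !(PySem.Dict.contains (c.insert k (g k)) j))
           = rest.filter (fun j => !(PySem.Dict.contains c j)) := by
        apply List.filter_congr
        intro j hj
        have hjk : (j == k) = false := by
          simp only [beq_eq_false_iff_ne]; exact fun h => hkrest (h ▸ hj)
        rw [PySem.Dict.contains_insert, hjk]; simp
      rw [this]; simp

/-- B's dedup loop: first-occurrence order, expressed as a filter against the accumulator. -/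
theorem pv_dedup (ks : List String) (acc : List String) (hnd : ks.Nodup) :
    ks.foldl (fun o k => if o.contains k then o else o ++ [k]) acc
    = acc ++ ks.filter (fun k => !(acc.contains k)) := by
  induction ks generalizing acc with
  | nil => simp
  | cons k rest ih =>
    have hkrest : k ∉ rest := (List.nodup_cons.mp hnd).1
    have hrest : rest.Nodup := (List.nodup_cons.mp hnd).2
    simp only [List.foldl_cons, List.filter_cons]
    by_cases hc : acc.contains k = true
    · rw [if_pos hc, ih acc hrest, hc]; simp
    · have hc' : acc.contains k = false := by simpa using hc
      have hkacc : k ∉ acc := by simpa using hc'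
      rw [if_neg (by simpa using hc'), ih _ hrest, hc']
      have : rest.filter (fun j => !((acc ++ [k]).contains j))
           = rest.filter (fun j => !(acc.contains j)) := by
        apply List.filter_congr
        intro j hj
        have : j ≠ k := fun h => hkrest (h ▸ hj)
        simp [this]
      rw [this]; simp

/-- In a nodup-keyed association list, filtering by a present key yields its single pair. -/
theorem pv_filter_single (l : List (String × Int)) (k : String) (v : Int)
    (hnd : (l.map Prod.fst).Nodup) (hm : (k, v) ∈ l) :
    l.filter (fun kv => kv.1 == k) = [(k, v)] := by
  induction l with
  | nil => cases hm
  | cons p rest ih =>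
    simp only [List.map_cons, List.nodup_cons] at hnd
    rcases List.mem_cons.mp hm with h | h
    · subst h
      have hrest : rest.filter (fun kv => kv.1 == k) = [] := by
        apply List.filter_eq_nil_iff.mpr
        intro q hq hqk
        have hmq : q.1 ∈ rest.map Prod.fst := List.mem_map_of_mem (f := Prod.fst) hq
        rw [eq_of_beq hqk] at hmq
        exact hnd.1 hmq
      simp [hrest]
    · have hpk : (p.1 == k) = false := by
        apply beq_eq_false_iff_ne.mpr
        intro hpk
        exact hnd.1 (hpk ▸ (List.mem_map_of_mem h : (k, v).1 ∈ rest.map Prod.fst))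
      rw [List.filter_cons, hpk]
      simpa using ih hnd.2 h

/-- Filtering by an absent key yields nothing. -/
theorem pv_filter_none (l : List (String × Int)) (k : String)
    (hk : k ∉ l.map Prod.fst) :
    l.filter (fun kv => kv.1 == k) = [] := by
  apply List.filter_eq_nil_iff.mpr
  intro q hq hqk
  exact hk ((eq_of_beq hqk) ▸ List.mem_map_of_mem (f := Prod.fst) hq)

-- ===== VERDICT (by name: the statement is the Claim_ definition above) =====
theorem combine_dictionaries_spec : Claim_equal_combine_dictionaries := by
  intro d1 d2 _ hpre
  obtain ⟨h1, h2⟩ := hpre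
  unfold Spec_combine_dictionaries
  set K1 := d1.map Prod.fst with hK1
  set K2 := d2.map Prod.fst with hK2
  have hD1items : (PySem.Dict.mk d1).items = d1 := rfl
  have hD1keys : (PySem.Dict.mk d1).keys = K1 := rfl
  have hD2keys : (PySem.Dict.mk d2).keys = K2 := rfl
  -- ---- A side ----
  set F : String → Int := fun k => if PySem.Dict.contains (PySem.Dict.mk d2) k
      then PySem.Dict.getD (PySem.Dict.mk d1) k 0 + PySem.Dict.getD (PySem.Dict.mk d2) k 0
      else PySem.Dict.getD (PySem.Dict.mk d1) k 0 with hF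
  set c1 := K1.foldl (fun c k => PySem.Dict.insert c k (F k)) PySem.Dict.empty with hc1
  have hc1items : c1.items = K1.map (fun k => (k, F k)) := by
    have := PySem.Dict.items_foldl_insert_fresh K1 (fun a => a) F PySem.Dict.empty
      (fun a _ => PySem.Dict.contains_empty a) (by simpa using h1)
    simpa [PySem.Dict.empty] using this
  have hc1keys : c1.keys = K1 := by
    show c1.items.map Prod.fst = K1
    rw [hc1items, List.map_map]
    have h : (Prod.fst ∘ fun k : String => ((k, F k) : String × Int)) = id := rfl
    rw [h, List.map_id]
  have hc1contains : ∀ k, PySem.Dict.contains c1 k = K1.contains k := by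
    intro k
    rw [PySem.Dict.contains_eq_decide_mem_keys, hc1keys]
    simp
  have hAside : combine_dictionaries d1 d2
      = K1.map (fun k => (k, F k))
        ++ (K2.filter (fun k => !(K1.contains k))).map
            (fun k => (k, PySem.Dict.getD (PySem.Dict.mk d2) k 0)) := by
    show (K2.foldl (fun c k => if PySem.Dict.contains c k then c
        else PySem.Dict.insert c k (PySem.Dict.getD (PySem.Dict.mk d2) k 0)) c1).items = _
    rw [pv_phase2 K2 _ c1 h2, hc1items]
    congr 2
    exact List.filter_congr fun k _ => by rw [hc1contains k]
  -- ---- B side ----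
  set S : String → Int := fun key =>
      ((d1 ++ d2).filter (fun kv => kv.1 == key)).foldl (fun s kv => s + kv.2) 0 with hS
  have horder : (d1 ++ d2).foldl (fun o kv => if o.contains kv.1 then o else o ++ [kv.1]) []
      = K1 ++ K2.filter (fun k => !(K1.contains k)) := by
    have hmap : (d1 ++ d2).foldl (fun o kv => if o.contains kv.1 then o else o ++ [kv.1]) []
        = (K1 ++ K2).foldl (fun o k => if o.contains k then o else o ++ [k]) [] := by
      rw [hK1, hK2, ← List.map_append, List.foldl_map]
    rw [hmap, List.foldl_append, pv_dedup K1 [] h1, pv_dedup K2 _ h2]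
    simp
  have hnodup_order : (K1 ++ K2.filter (fun k => !(K1.contains k))).Nodup := by
    refine List.Nodup.append h1 (h2.filter _) ?_
    intro k hk1 hk2
    have := (List.mem_filter.mp hk2).2
    simp only [Bool.not_eq_eq_eq_not, Bool.not_true, List.contains_eq_mem,
      decide_eq_false_iff_not] at this
    exact this hk1
  have hBside : combine_dictionaries_alt d1 d2
      = (K1 ++ K2.filter (fun k => !(K1.contains k))).map (fun k => (k, S k)) := by
    show ((((PySem.Dict.mk d1).items ++ (PySem.Dict.mk d2).items).foldl
        (fun o kv => if o.contains kv.1 then o else o ++ [kv.1]) []).foldl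
        (fun d key => d.insert key ((((PySem.Dict.mk d1).items ++ (PySem.Dict.mk d2).items).filter
          (fun kv => kv.1 == key)).foldl (fun s kv => s + kv.2) 0)) PySem.Dict.empty).items = _
    have hit : (PySem.Dict.mk d1).items ++ (PySem.Dict.mk d2).items = d1 ++ d2 := rfl
    rw [hit, horder]
    have := PySem.Dict.items_foldl_insert_fresh (K1 ++ K2.filter (fun k => !(K1.contains k)))
      (fun a => a) S PySem.Dict.empty (fun a _ => PySem.Dict.contains_empty a)
      (by simpa using hnodup_order)
    simpa [PySem.Dict.empty, hS] using this
  -- ---- pointwise agreement ----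
  rw [hAside, hBside, List.map_append]
  congr 1
  · -- keys of dict_1
    apply List.map_congr_left
    intro k hk
    obtain ⟨v, hmem⟩ : ∃ v, (k, v) ∈ d1 := by
      obtain ⟨⟨k', v⟩, hm, he⟩ := List.mem_map.mp hk
      exact ⟨v, he ▸ hm⟩
    have hv1 : PySem.Dict.getD (PySem.Dict.mk d1) k 0 = v :=
      PySem.Dict.getD_of_mem_items _ hmem h1 0
    have hf1 : d1.filter (fun kv => kv.1 == k) = [(k, v)] := pv_filter_single d1 k v h1 hmem
    have hval : F k = S k := by
      by_cases hk2 : k ∈ K2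
      · obtain ⟨w, hmem2⟩ : ∃ w, (k, w) ∈ d2 := by
          obtain ⟨⟨k', w⟩, hm, he⟩ := List.mem_map.mp hk2
          exact ⟨w, he ▸ hm⟩
        have hv2 : PySem.Dict.getD (PySem.Dict.mk d2) k 0 = w :=
          PySem.Dict.getD_of_mem_items _ hmem2 h2 0
        have hc2 : PySem.Dict.contains (PySem.Dict.mk d2) k = true := by
          rw [PySem.Dict.contains_eq_decide_mem_keys, hD2keys]; exact decide_eq_true hk2
        have hf2 : d2.filter (fun kv => kv.1 == k) = [(k, w)] := pv_filter_single d2 k w h2 hmem2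
        rw [hF, hS]
        simp only [List.filter_append, hf1, hf2, hc2, if_true, hv1, hv2,
          List.foldl_cons, List.foldl_nil, List.foldl_append]
        ring
      · have hc2 : PySem.Dict.contains (PySem.Dict.mk d2) k = false := by
          rw [PySem.Dict.contains_eq_decide_mem_keys, hD2keys]; exact decide_eq_false hk2
        have hf2 : d2.filter (fun kv => kv.1 == k) = [] := pv_filter_none d2 k hk2
        rw [hF, hS]
        simp only [List.filter_append, hf1, hf2, hc2, if_false, hv1,
          List.foldl_cons, List.foldl_nil, List.foldl_append, Bool.false_eq_true]
        ring
    exact congrArg (fun x => (k, x)) hval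
  · -- fresh keys of dict_2
    apply List.map_congr_left
    intro k hk
    have hk2 : k ∈ K2 := (List.mem_filter.mp hk).1
    have hk1 : k ∉ K1 := by
      have := (List.mem_filter.mp hk).2
      simpa using this
    obtain ⟨w, hmem2⟩ : ∃ w, (k, w) ∈ d2 := by
      obtain ⟨⟨k', w⟩, hm, he⟩ := List.mem_map.mp hk2
      exact ⟨w, he ▸ hm⟩
    have hv2 : PySem.Dict.getD (PySem.Dict.mk d2) k 0 = w :=
      PySem.Dict.getD_of_mem_items _ hmem2 h2 0
    have hf1 : d1.filter (fun kv => kv.1 == k) = [] := pv_filter_none d1 k hk1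
    have hf2 : d2.filter (fun kv => kv.1 == k) = [(k, w)] := pv_filter_single d2 k w h2 hmem2
    have hval : PySem.Dict.getD (PySem.Dict.mk d2) k 0 = S k := by
      rw [hS]
      simp only [List.filter_append, hf1, hf2, hv2, List.foldl_cons, List.foldl_nil,
        List.nil_append]
      ring
    exact congrArg (fun x => (k, x)) hval
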